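-- pv_equiv track=rewrite | github.com/sohampujari/PhishGuardAI | training/feature_engineering.py | _detect_char_swapping
-- ===== SOURCE A (Python) =====
-- def _detect_char_swapping(legit, suspicious):
--     """Detect character swapping typos."""
--     if len(legit) != len(suspicious):
--         return 0
--
--     differences = sum(1 for i, (c1, c2) in enumerate(zip(legit, suspicious)) if c1 != c2)
--
--     # Check for adjacent character swaps
--     for i in range(len(legit) - 1):
--         swapped = legit[:i] + legit[i+1] + legit[i] + legit[i+2:]
--         if swapped == suspicious:
--             return 1
--
--     return 1 if differences == 2 else 0
-- ===== SOURCE B (Python) =====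
-- def _detect_char_swapping(legit, suspicious):
--     """Detect character swapping typos: same length and exactly two differing positions."""
--     if len(legit) != len(suspicious):
--         return 0
--     diffs = sum(1 for c1, c2 in zip(legit, suspicious) if c1 != c2)
--     return 1 if diffs == 2 else 0
-- ===== Notes on version B (the rewrite author's own statement) =====
-- stated objective: faster
-- what changed: B drops A's O(n^2) loop that materializes every adjacent-swap candidate string and instead counts differing positions in one zip pass (any swap that changes the string yields exactly two differences, which A's final check already accepts).
-- intended difference: On identical strings that contain a doubled character (e.g. ('aa','aa')) A returns 1 because swapping the two equal neighbours reproduces the string itself; B returns 0, the intended value since an unchanged string is not a typo. — e.g. on _detect_char_swapping("aa", "aa"): A returns 1, B returns 0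
import Mathlib
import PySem

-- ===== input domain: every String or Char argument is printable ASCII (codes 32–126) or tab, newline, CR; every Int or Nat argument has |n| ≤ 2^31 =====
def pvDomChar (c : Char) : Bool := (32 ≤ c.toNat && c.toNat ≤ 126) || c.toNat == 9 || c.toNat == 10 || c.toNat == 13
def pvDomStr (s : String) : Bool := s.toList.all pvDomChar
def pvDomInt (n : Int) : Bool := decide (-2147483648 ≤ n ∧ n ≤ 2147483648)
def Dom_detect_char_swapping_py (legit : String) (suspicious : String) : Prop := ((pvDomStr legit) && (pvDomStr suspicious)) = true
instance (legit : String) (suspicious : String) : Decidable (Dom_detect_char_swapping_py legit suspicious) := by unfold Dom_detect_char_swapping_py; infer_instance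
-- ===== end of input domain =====

-- B replaces A's quadratic adjacent-swap candidate loop by one zip pass counting differing
-- positions (objective: faster); on identical strings with a doubled character A returns 1
-- and B returns the intended 0 (see D_ below).


-- ===== PORT A =====
-- swapped = legit[:i] + legit[i+1] + legit[i] + legit[i+2:]; every loop index i has i+1 in range,
-- so pyGet? is always `some` (Option.toList carries the character).
def pvSwapAt (l : List Char) (i : Int) : List Char :=
  PySem.List.slice l none (some i)
    ++ (PySem.List.pyGet? l (i + 1)).toList
    ++ (PySem.List.pyGet? l i).toList
    ++ PySem.List.slice l (some (i + 2)) none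

-- the for-loop over range(len(legit) - 1) with its early `return 1`
def pvALoop (l s : List Char) (diffs : Int) : List Int → Int
  | [] => if diffs = 2 then 1 else 0
  | i :: rest => if pvSwapAt l i = s then 1 else pvALoop l s diffs rest

def detect_char_swapping_py (legit : String) (suspicious : String) : Int :=
  let l := legit.toList
  let s := suspicious.toList
  if l.length ≠ s.length then 0
  else
    let differences := (PySem.List.enumerate (l.zip s)).foldl
      (fun acc p => if p.2.1 ≠ p.2.2 then acc + 1 else acc) 0
    pvALoop l s differences (PySem.List.pyRange 0 ((l.length : Int) - 1) 1)

-- ===== PORT B =====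
def detect_char_swapping_py_alt (legit : String) (suspicious : String) : Int :=
  let l := legit.toList
  let s := suspicious.toList
  if l.length ≠ s.length then 0
  else
    let diffs := (l.zip s).foldl (fun acc p => if p.1 ≠ p.2 then acc + 1 else acc) (0 : Int)
    if diffs = 2 then 1 else 0

-- ===== PRECONDITION & SPEC =====
-- On identical strings that contain a doubled character, A returns 1 (swapping the two equal
-- neighbours reproduces the string itself); B returns 0, the intended value since an unchanged
-- string is not a typo.
def D_detect_char_swapping_py (legit : String) (suspicious : String) : Prop :=
  legit = suspicious ∧ (legit.toList.zip legit.toList.tail).any (fun p => p.1 == p.2) = true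
instance (legit : String) (suspicious : String) : Decidable (D_detect_char_swapping_py legit suspicious) := by unfold D_detect_char_swapping_py; infer_instance

def Spec_detect_char_swapping_py (legit : String) (suspicious : String) (out : Int) : Prop :=
  ¬ D_detect_char_swapping_py legit suspicious → out = detect_char_swapping_py_alt legit suspicious
instance (legit : String) (suspicious : String) (out : Int) : Decidable (Spec_detect_char_swapping_py legit suspicious out) := by unfold Spec_detect_char_swapping_py; infer_instance

def pvDiffWitness_detect_char_swapping_py : String × String := ("aa", "aa")
def pvDiffWitnessOut_detect_char_swapping_py : Int × Int := (1, 0)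

-- ===== CLAIM (what is proved, stated in full; the proofs are below) =====
def Claim_unchanged_detect_char_swapping_py : Prop := ∀ (legit : String) (suspicious : String), Dom_detect_char_swapping_py legit suspicious → Spec_detect_char_swapping_py legit suspicious (detect_char_swapping_py legit suspicious)
def Claim_changed_detect_char_swapping_py : Prop := Dom_detect_char_swapping_py (pvDiffWitness_detect_char_swapping_py.1) (pvDiffWitness_detect_char_swapping_py.2) ∧ D_detect_char_swapping_py (pvDiffWitness_detect_char_swapping_py.1) (pvDiffWitness_detect_char_swapping_py.2) ∧ detect_char_swapping_py (pvDiffWitness_detect_char_swapping_py.1) (pvDiffWitness_detect_char_swapping_py.2) = pvDiffWitnessOut_detect_char_swapping_py.1 ∧ detect_char_swapping_py_alt (pvDiffWitness_detect_char_swapping_py.1) (pvDiffWitness_detect_char_swapping_py.2) = pvDiffWitnessOut_detect_char_swapping_py.2 ∧ pvDiffWitnessOut_detect_char_swapping_py.1 ≠ pvDiffWitnessOut_detect_char_swapping_py.2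
def Claim_exact_detect_char_swapping_py : Prop := ∀ (legit : String) (suspicious : String), Dom_detect_char_swapping_py legit suspicious → D_detect_char_swapping_py legit suspicious → detect_char_swapping_py legit suspicious ≠ detect_char_swapping_py_alt legit suspicious

-- ===== LEMMAS AND PROOFS =====

theorem pvFoldlCount (L : List (Char × Char)) (a : Int) :
    L.foldl (fun acc p => if p.1 ≠ p.2 then acc + 1 else acc) a
      = a + (L.countP (fun p => p.1 != p.2) : Int) := by
  have h := PySem.List.foldl_count_if (fun p : Char × Char => p.1 != p.2) L a
  simpa [bne_iff_ne] using h

theorem pvEnumCount (L : List (Char × Char)) (a : Int) :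
    (PySem.List.enumerate L).foldl (fun acc p => if p.2.1 ≠ p.2.2 then acc + 1 else acc) a
      = a + (L.countP (fun p => p.1 != p.2) : Int) := by
  have h := PySem.List.foldl_count_if (fun p : Int × (Char × Char) => p.2.1 != p.2.2)
    (PySem.List.enumerate L) a
  have h2 : (PySem.List.enumerate L).countP (fun p => p.2.1 != p.2.2)
      = L.countP (fun p => p.1 != p.2) := by
    conv_rhs => rw [← PySem.List.map_snd_enumerate L 0]
    rw [List.countP_map]
    rfl
  simpa [bne_iff_ne, h2] using h

theorem pvCountZipSelf (l : List Char) :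
    (l.zip l).countP (fun p => p.1 != p.2) = 0 := by
  induction l with
  | nil => rfl
  | cons a t ih => simp [ih]

theorem pvDecomp (l : List Char) (n : Nat) (h : n + 1 < l.length) :
    l = l.take n ++ l[n] :: l[n + 1] :: l.drop (n + 1 + 1) := by
  conv_lhs => rw [← List.take_append_drop n l]
  rw [List.drop_eq_getElem_cons (show n < l.length by omega),
      List.drop_eq_getElem_cons (show n + 1 < l.length from h)]

theorem pvSwapAt_eq (l : List Char) (n : Nat) (h : n + 1 < l.length) :
    pvSwapAt l (n : Int) = l.take n ++ l[n + 1] :: l[n] :: l.drop (n + 1 + 1) := by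
  unfold pvSwapAt
  have h1 : ((n : Int) + 1) = (((n + 1 : Nat)) : Int) := by push_cast; ring
  have h2 : ((n : Int) + 2) = (((n + 1 + 1 : Nat)) : Int) := by push_cast; ring
  rw [h1, h2, PySem.List.slice_to_natCast, PySem.List.slice_from_natCast,
    PySem.List.pyGet?_natCast, PySem.List.pyGet?_natCast,
    List.getElem?_eq_getElem h, List.getElem?_eq_getElem (show n < l.length by omega)]
  simp

theorem pvCountSwap (t r : List Char) (a b : Char) :
    ((t ++ a :: b :: r).zip (t ++ b :: a :: r)).countP (fun p => p.1 != p.2)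
      = if a = b then 0 else 2 := by
  rw [List.zip_append rfl, List.countP_append]
  by_cases hab : a = b
  · subst hab
    simp [pvCountZipSelf]
  · simp [pvCountZipSelf, hab, Ne.symm hab]

theorem pvALoop_eq (l s : List Char)
    (hnd : ¬ (l = s ∧ (l.zip l.tail).any (fun p => p.1 == p.2) = true))
    (d : Int) (R : List Int)
    (hR : ∀ i ∈ R, 0 ≤ i ∧ i < (l.length : Int) - 1)
    (hd : d = ((l.zip s).countP (fun p => p.1 != p.2) : Int)) :
    pvALoop l s d R = if d = 2 then 1 else 0 := by
  induction R with
  | nil => rfl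
  | cons i rest ih =>
    rw [pvALoop]
    by_cases hsw : pvSwapAt l i = s
    · rw [if_pos hsw]
      obtain ⟨h0, h1⟩ := hR i (List.mem_cons_self ..)
      have hi : i = (i.toNat : Int) := (Int.toNat_of_nonneg h0).symm
      set n := i.toNat with hn
      have hlt : n + 1 < l.length := by rw [hi] at h1; omega
      rw [hi, pvSwapAt_eq l n hlt] at hsw
      have hl := pvDecomp l n hlt
      have hc : ((l.zip s).countP (fun p => p.1 != p.2))
          = if l[n] = l[n + 1] then 0 else 2 := by
        conv_lhs => rw [hl, ← hsw]
        exact pvCountSwap (l.take n) (l.drop (n + 1 + 1)) l[n] l[n + 1]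
      by_cases hab : l[n] = l[n + 1]
      · exfalso
        apply hnd
        refine ⟨by rw [hl, ← hsw, hab], ?_⟩
        rw [List.any_eq_true]
        refine ⟨(l[n], l[n + 1]), ?_, by simp [hab]⟩
        have hlen' : n < (l.zip l.tail).length := by
          simp only [List.length_zip, List.length_tail]
          omega
        have hg : (l.zip l.tail)[n] = (l[n], l[n + 1]) := by
          rw [List.getElem_zip, List.getElem_tail]
        exact hg ▸ List.getElem_mem hlen'
      · have hd2 : d = 2 := by rw [hd, hc, if_neg hab]; rfl
        rw [if_pos hd2]
    · rw [if_neg hsw]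
      exact ih (fun j hj => hR j (List.mem_cons_of_mem _ hj))

theorem pvALoop_one (l s : List Char) (d : Int) (R : List Int) (i : Int)
    (hi : i ∈ R) (hsw : pvSwapAt l i = s) : pvALoop l s d R = 1 := by
  induction R with
  | nil => cases hi
  | cons j rest ih =>
    simp only [pvALoop]
    split_ifs with h
    · rfl
    · rcases List.mem_cons.mp hi with h' | h'
      · exact absurd (h' ▸ hsw) h
      · exact ih h'

theorem pvD_iff (legit suspicious : String) :
    D_detect_char_swapping_py legit suspicious ↔
      (legit.toList = suspicious.toList ∧
        (legit.toList.zip legit.toList.tail).any (fun p => p.1 == p.2) = true) := by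
  unfold D_detect_char_swapping_py
  constructor
  · rintro ⟨h1, h2⟩; exact ⟨by rw [h1], h2⟩
  · rintro ⟨h1, h2⟩; exact ⟨String.toList_inj.mp h1, h2⟩

-- ===== VERDICT (by name: the statement is the Claim_ definition above) =====
theorem detect_char_swapping_py_spec : Claim_unchanged_detect_char_swapping_py := by
  intro legit suspicious _ hND
  show detect_char_swapping_py legit suspicious = detect_char_swapping_py_alt legit suspicious
  simp only [detect_char_swapping_py, detect_char_swapping_py_alt]
  rcases eq_or_ne legit.toList.length suspicious.toList.length with hlen | hlen
  · rw [if_neg (not_not_intro hlen), if_neg (not_not_intro hlen),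
      pvEnumCount, pvFoldlCount]
    simp only [zero_add]
    apply pvALoop_eq
    · intro hc
      exact hND ((pvD_iff legit suspicious).mpr hc)
    · intro i hi
      have := PySem.List.mem_pyRange_one.mp hi
      omega
    · rfl
  · rw [if_pos hlen, if_pos hlen]

theorem detect_char_swapping_py_changed : Claim_changed_detect_char_swapping_py := by
  unfold Claim_changed_detect_char_swapping_py; decide

theorem detect_char_swapping_py_tight : Claim_exact_detect_char_swapping_py := by
  intro legit suspicious _ hD
  obtain ⟨hls, hany⟩ := (pvD_iff legit suspicious).mp hD
  simp only [detect_char_swapping_py, detect_char_swapping_py_alt, ← hls]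
  rw [if_neg (not_not_intro rfl), if_neg (not_not_intro rfl), pvFoldlCount]
  simp only [zero_add, pvCountZipSelf]
  rw [List.any_eq_true] at hany
  obtain ⟨p, hpmem, hpq⟩ := hany
  obtain ⟨n, hn, hpn⟩ := List.mem_iff_getElem.mp hpmem
  have hn' : n + 1 < legit.toList.length := by
    simp only [List.length_zip, List.length_tail] at hn
    omega
  have hab : legit.toList[n] = legit.toList[n + 1] := by
    rw [← hpn, List.getElem_zip] at hpq
    rw [List.getElem_tail] at hpq
    simpa using hpq
  have hsw : pvSwapAt legit.toList ((n : Nat) : Int) = legit.toList := by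
    rw [pvSwapAt_eq legit.toList n hn']
    conv_rhs => rw [pvDecomp legit.toList n hn']
    rw [hab]
  rw [pvALoop_one legit.toList legit.toList _ _ ((n : Nat) : Int)
    (PySem.List.mem_pyRange_one.mpr (by constructor <;> omega)) hsw]
  norm_num
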